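-- pv_equiv track=rewrite | github.com/SamsonProject/SkyModderAI | research_pipeline.py | categorize_nexus_mod
-- ===== SOURCE A (Python) =====
-- from typing import Any, Dict, List, Optional
--
-- def categorize_nexus_mod(details: Dict[str, Any]) -> str:
--     """Categorize Nexus mod based on its properties."""
--     categories = details.get("categories", [])
--     category_ids = [c.get("category_id") for c in categories] if categories else []
--
--     # Category mapping from Nexus IDs
--     if 1 in category_ids:  # Armour
--         return "design"
--     elif 2 in category_ids:  # Art
--         return "design"
--     elif 3 in category_ids:  # Audio
--         return "design"
--     elif 6 in category_ids:  # Gameplay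
--         return "fun"
--     elif 7 in category_ids:  # Items
--         return "fun"
--     elif 8 in category_ids:  # Landscapes
--         return "environmental"
--     elif 9 in category_ids:  # Models and Textures
--         return "design"
--     elif 10 in category_ids:  # Overhauls
--         return "fun"
--     elif 11 in category_ids:  # Patches
--         return "utility"
--     elif 12 in category_ids:  # Player Homes
--         return "environmental"
--     elif 13 in category_ids:  # Quests
--         return "fun"
--     elif 14 in category_ids:  # Utilities
--         return "utility"
--     elif 15 in category_ids:  # Visuals and Graphics
--         return "design"
--
--     return "uncategorized"
-- ===== SOURCE B (Python) =====
-- _LABELS = {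
--     1: "design", 2: "design", 3: "design",
--     6: "fun", 7: "fun", 8: "environmental", 9: "design",
--     10: "fun", 11: "utility", 12: "environmental",
--     13: "fun", 14: "utility", 15: "design",
-- }
--
-- def categorize_nexus_mod(details):
--     """Categorize Nexus mod based on its properties."""
--     # The if-elif priority in the original is exactly ascending id order,
--     # so the winning branch is the SMALLEST mapped category id present.
--     known = [c.get("category_id") for c in details.get("categories", [])
--              if c.get("category_id") in _LABELS]
--     return _LABELS[min(known)] if known else "uncategorized"
-- ===== Notes on version B (the rewrite author's own statement) =====
-- stated objective: simpler
-- what changed: Instead of a 13-branch priority chain, B observes the priority order is ascending id order, so it filters the mod's category ids to those with a label and returns the label of the minimum one.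
import Mathlib
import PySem

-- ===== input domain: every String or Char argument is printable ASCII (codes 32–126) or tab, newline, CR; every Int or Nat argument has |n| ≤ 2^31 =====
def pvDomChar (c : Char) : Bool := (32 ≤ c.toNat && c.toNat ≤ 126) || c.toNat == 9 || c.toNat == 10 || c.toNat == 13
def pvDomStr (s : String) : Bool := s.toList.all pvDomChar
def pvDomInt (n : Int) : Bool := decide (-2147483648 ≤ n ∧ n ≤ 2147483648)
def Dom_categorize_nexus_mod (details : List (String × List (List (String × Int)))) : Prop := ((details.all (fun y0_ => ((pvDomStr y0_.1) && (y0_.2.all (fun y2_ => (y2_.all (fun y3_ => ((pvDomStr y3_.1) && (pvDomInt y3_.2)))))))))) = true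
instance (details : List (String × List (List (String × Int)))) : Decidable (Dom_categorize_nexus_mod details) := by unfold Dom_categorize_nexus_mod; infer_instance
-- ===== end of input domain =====

-- B replaces the 13-branch priority chain by a different algorithm: since the chain's
-- priority order is exactly ascending id order, B takes the MINIMUM mapped category id
-- present and looks up its label (simpler).

-- ===== PORT A =====
def categorize_nexus_mod (details : List (String × List (List (String × Int)))) : String :=
  let categories := PySem.Dict.getD (PySem.Dict.mk details) "categories" []
  let category_ids : List (Option Int) :=
    if categories ≠ [] then categories.map (fun c => PySem.Dict.get? (PySem.Dict.mk c) "category_id") else []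
  if some 1 ∈ category_ids then "design"
  else if some 2 ∈ category_ids then "design"
  else if some 3 ∈ category_ids then "design"
  else if some 6 ∈ category_ids then "fun"
  else if some 7 ∈ category_ids then "fun"
  else if some 8 ∈ category_ids then "environmental"
  else if some 9 ∈ category_ids then "design"
  else if some 10 ∈ category_ids then "fun"
  else if some 11 ∈ category_ids then "utility"
  else if some 12 ∈ category_ids then "environmental"
  else if some 13 ∈ category_ids then "fun"
  else if some 14 ∈ category_ids then "utility"
  else if some 15 ∈ category_ids then "design"
  else "uncategorized"

-- ===== PORT B =====
def pvLabels : PySem.Dict Int String :=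
  PySem.Dict.mk
    [(1, "design"), (2, "design"), (3, "design"),
     (6, "fun"), (7, "fun"), (8, "environmental"), (9, "design"),
     (10, "fun"), (11, "utility"), (12, "environmental"),
     (13, "fun"), (14, "utility"), (15, "design")]

def categorize_nexus_mod_alt (details : List (String × List (List (String × Int)))) : String :=
  -- known = [c.get("category_id") for c in details.get("categories", []) if c.get("category_id") in _LABELS]
  let known : List Int :=
    (PySem.Dict.getD (PySem.Dict.mk details) "categories" []).filterMap
      (fun c => match PySem.Dict.get? (PySem.Dict.mk c) "category_id" with
        | some v => if (PySem.Dict.get? pvLabels v).isSome then some v else none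
        | none => none)
  -- return _LABELS[min(known)] if known else "uncategorized"
  match PySem.List.min? known (fun x => x) with
  | some m => (PySem.Dict.get? pvLabels m).getD "uncategorized"  -- lookup never misses: min known is a key of _LABELS
  | none => "uncategorized"  -- known == []

-- ===== PRECONDITION & SPEC =====
def Spec_categorize_nexus_mod (details : List (String × List (List (String × Int)))) (out : String) : Prop := out = categorize_nexus_mod_alt details
instance (details : List (String × List (List (String × Int)))) (out : String) : Decidable (Spec_categorize_nexus_mod details out) := by unfold Spec_categorize_nexus_mod; infer_instance

-- ===== CLAIM =====
def Claim_equal_categorize_nexus_mod : Prop := ∀ (details : List (String × List (List (String × Int)))), Dom_categorize_nexus_mod details → Spec_categorize_nexus_mod details (categorize_nexus_mod details)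

-- ===== LEMMAS AND PROOFS =====

-- min? with the identity key returns exactly the least element.
theorem min_id_eq (l : List Int) (m : Int) (hm : m ∈ l) (hle : ∀ x ∈ l, m ≤ x) :
    PySem.List.min? l (fun x => x) = some m := by
  cases h : PySem.List.min? l (fun x => x) with
  | none =>
      rw [PySem.List.min?_eq_none_iff] at h
      subst h; simp at hm
  | some m' =>
      have h1 : m' ∈ l := PySem.List.min?_mem h
      have h2 : m ≤ m' := hle m' h1
      have h3 : m' ≤ m := PySem.List.min?_isMin h m hm
      rw [le_antisymm h3 h2]

-- any key with a binding in pvLabels is one of the 13 ids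
theorem mem_labels (v : Int) (h : (PySem.Dict.get? pvLabels v).isSome = true) :
    v = 1 ∨ v = 2 ∨ v = 3 ∨ v = 6 ∨ v = 7 ∨ v = 8 ∨ v = 9 ∨ v = 10 ∨ v = 11 ∨ v = 12 ∨ v = 13 ∨ v = 14 ∨ v = 15 := by
  simp [pvLabels, PySem.Dict.get?] at h
  omega

-- the chain restated over the kept (plain-Int) id list equals the min-lookup
theorem chainF (F : List Int)
    (hall : ∀ x ∈ F, x = 1 ∨ x = 2 ∨ x = 3 ∨ x = 6 ∨ x = 7 ∨ x = 8 ∨ x = 9 ∨ x = 10 ∨ x = 11 ∨ x = 12 ∨ x = 13 ∨ x = 14 ∨ x = 15) :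
    (if 1 ∈ F then "design"
     else if 2 ∈ F then "design"
     else if 3 ∈ F then "design"
     else if 6 ∈ F then "fun"
     else if 7 ∈ F then "fun"
     else if 8 ∈ F then "environmental"
     else if 9 ∈ F then "design"
     else if 10 ∈ F then "fun"
     else if 11 ∈ F then "utility"
     else if 12 ∈ F then "environmental"
     else if 13 ∈ F then "fun"
     else if 14 ∈ F then "utility"
     else if 15 ∈ F then "design"
     else "uncategorized") =
    (match PySem.List.min? F (fun x => x) with
     | some m => (PySem.Dict.get? pvLabels m).getD "uncategorized"
     | none => "uncategorized") := by
  by_cases h1 : (1:Int) ∈ F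
  · have hb : ∀ x ∈ F, (1:Int) ≤ x := by
      intro x hx
      have hid := hall x hx
      omega
    rw [min_id_eq F 1 h1 hb]
    simp only [h1, if_true]
    decide
  by_cases h2 : (2:Int) ∈ F
  · have hb : ∀ x ∈ F, (2:Int) ≤ x := by
      intro x hx
      have hid := hall x hx
      have e1 : x ≠ 1 := fun e => h1 (e ▸ hx)
      omega
    rw [min_id_eq F 2 h2 hb]
    simp only [h1, h2, if_true, if_false]
    decide
  by_cases h3 : (3:Int) ∈ F
  · have hb : ∀ x ∈ F, (3:Int) ≤ x := by
      intro x hx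
      have hid := hall x hx
      have e1 : x ≠ 1 := fun e => h1 (e ▸ hx)
      have e2 : x ≠ 2 := fun e => h2 (e ▸ hx)
      omega
    rw [min_id_eq F 3 h3 hb]
    simp only [h1, h2, h3, if_true, if_false]
    decide
  by_cases h6 : (6:Int) ∈ F
  · have hb : ∀ x ∈ F, (6:Int) ≤ x := by
      intro x hx
      have hid := hall x hx
      have e1 : x ≠ 1 := fun e => h1 (e ▸ hx)
      have e2 : x ≠ 2 := fun e => h2 (e ▸ hx)
      have e3 : x ≠ 3 := fun e => h3 (e ▸ hx)
      omega
    rw [min_id_eq F 6 h6 hb]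
    simp only [h1, h2, h3, h6, if_true, if_false]
    decide
  by_cases h7 : (7:Int) ∈ F
  · have hb : ∀ x ∈ F, (7:Int) ≤ x := by
      intro x hx
      have hid := hall x hx
      have e1 : x ≠ 1 := fun e => h1 (e ▸ hx)
      have e2 : x ≠ 2 := fun e => h2 (e ▸ hx)
      have e3 : x ≠ 3 := fun e => h3 (e ▸ hx)
      have e6 : x ≠ 6 := fun e => h6 (e ▸ hx)
      omega
    rw [min_id_eq F 7 h7 hb]
    simp only [h1, h2, h3, h6, h7, if_true, if_false]
    decide
  by_cases h8 : (8:Int) ∈ F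
  · have hb : ∀ x ∈ F, (8:Int) ≤ x := by
      intro x hx
      have hid := hall x hx
      have e1 : x ≠ 1 := fun e => h1 (e ▸ hx)
      have e2 : x ≠ 2 := fun e => h2 (e ▸ hx)
      have e3 : x ≠ 3 := fun e => h3 (e ▸ hx)
      have e6 : x ≠ 6 := fun e => h6 (e ▸ hx)
      have e7 : x ≠ 7 := fun e => h7 (e ▸ hx)
      omega
    rw [min_id_eq F 8 h8 hb]
    simp only [h1, h2, h3, h6, h7, h8, if_true, if_false]
    decide
  by_cases h9 : (9:Int) ∈ F
  · have hb : ∀ x ∈ F, (9:Int) ≤ x := by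
      intro x hx
      have hid := hall x hx
      have e1 : x ≠ 1 := fun e => h1 (e ▸ hx)
      have e2 : x ≠ 2 := fun e => h2 (e ▸ hx)
      have e3 : x ≠ 3 := fun e => h3 (e ▸ hx)
      have e6 : x ≠ 6 := fun e => h6 (e ▸ hx)
      have e7 : x ≠ 7 := fun e => h7 (e ▸ hx)
      have e8 : x ≠ 8 := fun e => h8 (e ▸ hx)
      omega
    rw [min_id_eq F 9 h9 hb]
    simp only [h1, h2, h3, h6, h7, h8, h9, if_true, if_false]
    decide
  by_cases h10 : (10:Int) ∈ F
  · have hb : ∀ x ∈ F, (10:Int) ≤ x := by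
      intro x hx
      have hid := hall x hx
      have e1 : x ≠ 1 := fun e => h1 (e ▸ hx)
      have e2 : x ≠ 2 := fun e => h2 (e ▸ hx)
      have e3 : x ≠ 3 := fun e => h3 (e ▸ hx)
      have e6 : x ≠ 6 := fun e => h6 (e ▸ hx)
      have e7 : x ≠ 7 := fun e => h7 (e ▸ hx)
      have e8 : x ≠ 8 := fun e => h8 (e ▸ hx)
      have e9 : x ≠ 9 := fun e => h9 (e ▸ hx)
      omega
    rw [min_id_eq F 10 h10 hb]
    simp only [h1, h2, h3, h6, h7, h8, h9, h10, if_true, if_false]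
    decide
  by_cases h11 : (11:Int) ∈ F
  · have hb : ∀ x ∈ F, (11:Int) ≤ x := by
      intro x hx
      have hid := hall x hx
      have e1 : x ≠ 1 := fun e => h1 (e ▸ hx)
      have e2 : x ≠ 2 := fun e => h2 (e ▸ hx)
      have e3 : x ≠ 3 := fun e => h3 (e ▸ hx)
      have e6 : x ≠ 6 := fun e => h6 (e ▸ hx)
      have e7 : x ≠ 7 := fun e => h7 (e ▸ hx)
      have e8 : x ≠ 8 := fun e => h8 (e ▸ hx)
      have e9 : x ≠ 9 := fun e => h9 (e ▸ hx)
      have e10 : x ≠ 10 := fun e => h10 (e ▸ hx)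
      omega
    rw [min_id_eq F 11 h11 hb]
    simp only [h1, h2, h3, h6, h7, h8, h9, h10, h11, if_true, if_false]
    decide
  by_cases h12 : (12:Int) ∈ F
  · have hb : ∀ x ∈ F, (12:Int) ≤ x := by
      intro x hx
      have hid := hall x hx
      have e1 : x ≠ 1 := fun e => h1 (e ▸ hx)
      have e2 : x ≠ 2 := fun e => h2 (e ▸ hx)
      have e3 : x ≠ 3 := fun e => h3 (e ▸ hx)
      have e6 : x ≠ 6 := fun e => h6 (e ▸ hx)
      have e7 : x ≠ 7 := fun e => h7 (e ▸ hx)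
      have e8 : x ≠ 8 := fun e => h8 (e ▸ hx)
      have e9 : x ≠ 9 := fun e => h9 (e ▸ hx)
      have e10 : x ≠ 10 := fun e => h10 (e ▸ hx)
      have e11 : x ≠ 11 := fun e => h11 (e ▸ hx)
      omega
    rw [min_id_eq F 12 h12 hb]
    simp only [h1, h2, h3, h6, h7, h8, h9, h10, h11, h12, if_true, if_false]
    decide
  by_cases h13 : (13:Int) ∈ F
  · have hb : ∀ x ∈ F, (13:Int) ≤ x := by
      intro x hx
      have hid := hall x hx
      have e1 : x ≠ 1 := fun e => h1 (e ▸ hx)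
      have e2 : x ≠ 2 := fun e => h2 (e ▸ hx)
      have e3 : x ≠ 3 := fun e => h3 (e ▸ hx)
      have e6 : x ≠ 6 := fun e => h6 (e ▸ hx)
      have e7 : x ≠ 7 := fun e => h7 (e ▸ hx)
      have e8 : x ≠ 8 := fun e => h8 (e ▸ hx)
      have e9 : x ≠ 9 := fun e => h9 (e ▸ hx)
      have e10 : x ≠ 10 := fun e => h10 (e ▸ hx)
      have e11 : x ≠ 11 := fun e => h11 (e ▸ hx)
      have e12 : x ≠ 12 := fun e => h12 (e ▸ hx)
      omega
    rw [min_id_eq F 13 h13 hb]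
    simp only [h1, h2, h3, h6, h7, h8, h9, h10, h11, h12, h13, if_true, if_false]
    decide
  by_cases h14 : (14:Int) ∈ F
  · have hb : ∀ x ∈ F, (14:Int) ≤ x := by
      intro x hx
      have hid := hall x hx
      have e1 : x ≠ 1 := fun e => h1 (e ▸ hx)
      have e2 : x ≠ 2 := fun e => h2 (e ▸ hx)
      have e3 : x ≠ 3 := fun e => h3 (e ▸ hx)
      have e6 : x ≠ 6 := fun e => h6 (e ▸ hx)
      have e7 : x ≠ 7 := fun e => h7 (e ▸ hx)
      have e8 : x ≠ 8 := fun e => h8 (e ▸ hx)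
      have e9 : x ≠ 9 := fun e => h9 (e ▸ hx)
      have e10 : x ≠ 10 := fun e => h10 (e ▸ hx)
      have e11 : x ≠ 11 := fun e => h11 (e ▸ hx)
      have e12 : x ≠ 12 := fun e => h12 (e ▸ hx)
      have e13 : x ≠ 13 := fun e => h13 (e ▸ hx)
      omega
    rw [min_id_eq F 14 h14 hb]
    simp only [h1, h2, h3, h6, h7, h8, h9, h10, h11, h12, h13, h14, if_true, if_false]
    decide
  by_cases h15 : (15:Int) ∈ F
  · have hb : ∀ x ∈ F, (15:Int) ≤ x := by
      intro x hx
      have hid := hall x hx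
      have e1 : x ≠ 1 := fun e => h1 (e ▸ hx)
      have e2 : x ≠ 2 := fun e => h2 (e ▸ hx)
      have e3 : x ≠ 3 := fun e => h3 (e ▸ hx)
      have e6 : x ≠ 6 := fun e => h6 (e ▸ hx)
      have e7 : x ≠ 7 := fun e => h7 (e ▸ hx)
      have e8 : x ≠ 8 := fun e => h8 (e ▸ hx)
      have e9 : x ≠ 9 := fun e => h9 (e ▸ hx)
      have e10 : x ≠ 10 := fun e => h10 (e ▸ hx)
      have e11 : x ≠ 11 := fun e => h11 (e ▸ hx)
      have e12 : x ≠ 12 := fun e => h12 (e ▸ hx)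
      have e13 : x ≠ 13 := fun e => h13 (e ▸ hx)
      have e14 : x ≠ 14 := fun e => h14 (e ▸ hx)
      omega
    rw [min_id_eq F 15 h15 hb]
    simp only [h1, h2, h3, h6, h7, h8, h9, h10, h11, h12, h13, h14, h15, if_true, if_false]
    decide

  -- no mapped id present: F is empty
  have hF : F = [] := by
    cases hFe : F with
    | nil => rfl
    | cons a t =>
        exfalso
        have ha : a ∈ F := by rw [hFe]; exact List.mem_cons_self
        have hid := hall a ha
        have e1 : a ≠ 1 := fun e => h1 (e ▸ ha)
        have e2 : a ≠ 2 := fun e => h2 (e ▸ ha)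
        have e3 : a ≠ 3 := fun e => h3 (e ▸ ha)
        have e6 : a ≠ 6 := fun e => h6 (e ▸ ha)
        have e7 : a ≠ 7 := fun e => h7 (e ▸ ha)
        have e8 : a ≠ 8 := fun e => h8 (e ▸ ha)
        have e9 : a ≠ 9 := fun e => h9 (e ▸ ha)
        have e10 : a ≠ 10 := fun e => h10 (e ▸ ha)
        have e11 : a ≠ 11 := fun e => h11 (e ▸ ha)
        have e12 : a ≠ 12 := fun e => h12 (e ▸ ha)
        have e13 : a ≠ 13 := fun e => h13 (e ▸ ha)
        have e14 : a ≠ 14 := fun e => h14 (e ▸ ha)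
        have e15 : a ≠ 15 := fun e => h15 (e ▸ ha)
        omega
  subst hF
  simp [PySem.List.min?]

-- the unrolled chain over an Option-Int id list equals B's min-lookup over the kept ids
theorem chain_eq_min (l : List (Option Int)) :
    (if some 1 ∈ l then "design"
     else if some 2 ∈ l then "design"
     else if some 3 ∈ l then "design"
     else if some 6 ∈ l then "fun"
     else if some 7 ∈ l then "fun"
     else if some 8 ∈ l then "environmental"
     else if some 9 ∈ l then "design"
     else if some 10 ∈ l then "fun"
     else if some 11 ∈ l then "utility"
     else if some 12 ∈ l then "environmental"
     else if some 13 ∈ l then "fun"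
     else if some 14 ∈ l then "utility"
     else if some 15 ∈ l then "design"
     else "uncategorized") =
    (match PySem.List.min? (l.filterMap (fun o => match o with
        | some v => if (PySem.Dict.get? pvLabels v).isSome then some v else none
        | none => none)) (fun x => x) with
     | some m => (PySem.Dict.get? pvLabels m).getD "uncategorized"
     | none => "uncategorized") := by
  set F := l.filterMap (fun o => match o with
    | some v => if (PySem.Dict.get? pvLabels v).isSome then some v else none
    | none => none) with hF
  have hmemF : ∀ k : Int, k ∈ F → (some k ∈ l ∧ (PySem.Dict.get? pvLabels k).isSome = true) := by
    intro k hk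
    rw [hF, List.mem_filterMap] at hk
    obtain ⟨o, ho, he⟩ := hk
    cases o with
    | none => simp at he
    | some v =>
        by_cases hv : (PySem.Dict.get? pvLabels v).isSome = true
        · simp [hv] at he; subst he; exact ⟨ho, hv⟩
        · simp [hv] at he
  have hmemL : ∀ k : Int, (PySem.Dict.get? pvLabels k).isSome = true → some k ∈ l → k ∈ F := by
    intro k hks hk
    rw [hF, List.mem_filterMap]
    exact ⟨some k, hk, by simp [hks]⟩
  have hchain : ∀ k : Int, k ∈ F → (k = 1 ∨ k = 2 ∨ k = 3 ∨ k = 6 ∨ k = 7 ∨ k = 8 ∨ k = 9 ∨ k = 10 ∨ k = 11 ∨ k = 12 ∨ k = 13 ∨ k = 14 ∨ k = 15) :=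
    fun k hk => mem_labels k (hmemF k hk).2
  -- replace each chain membership test 'some k ∈ l' with 'k ∈ F'
  have hiff : ∀ k : Int, (PySem.Dict.get? pvLabels k).isSome = true → ((some k ∈ l) ↔ (k ∈ F)) :=
    fun k hks => ⟨hmemL k hks, fun hk => (hmemF k hk).1⟩
  simp only [hiff 1 (by decide), hiff 2 (by decide), hiff 3 (by decide),
      hiff 6 (by decide), hiff 7 (by decide), hiff 8 (by decide),
      hiff 9 (by decide), hiff 10 (by decide), hiff 11 (by decide),
      hiff 12 (by decide), hiff 13 (by decide), hiff 14 (by decide),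
      hiff 15 (by decide)]
  exact chainF F hchain

-- ===== VERDICT =====
theorem categorize_nexus_mod_spec : Claim_equal_categorize_nexus_mod := by
  intro details _
  unfold Spec_categorize_nexus_mod categorize_nexus_mod categorize_nexus_mod_alt
  cases h : PySem.Dict.getD (PySem.Dict.mk details) "categories" [] with
  | nil => simp [PySem.List.min?]
  | cons c cs =>
      simp only [ne_eq, reduceCtorEq, not_false_iff, if_true]
      have hc := chain_eq_min ((c :: cs).map (fun c => PySem.Dict.get? (PySem.Dict.mk c) "category_id"))
      rw [List.filterMap_map] at hc
      exact hc
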